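-- pv_equiv track=rewrite | github.com/Koivunlehti/Python-kurssi-MOOC-2024 | osa_6/osio_1/tehtava_6.py | laske_tehtava_pisteet
-- ===== SOURCE A (Python) =====
-- def laske_tehtava_pisteet(tehtava_maara: int, max_tehtavamaara: int) -> int:
--     # Tehtyjen tehtävien muunto pisteiksi
--     prosentit = tehtava_maara * 100 // max_tehtavamaara
--     pisteet = 10
--     if prosentit == 100:
--         return 10
--     else:
--         for i in range(100,0,-10):
--             if prosentit < i:
--                 pisteet -= 1
--     return pisteet
-- ===== SOURCE B (Python) =====
-- def laske_tehtava_pisteet(tehtava_maara: int, max_tehtavamaara: int) -> int: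
--     prosentit = tehtava_maara * 100 // max_tehtavamaara
--     return max(0, min(10, prosentit // 10))
-- ===== Notes on version B (the rewrite author's own statement) =====
-- stated objective: simpler
-- what changed: Replaces the 10-iteration threshold-decrement loop (and the special case for 100%) with the closed form max(0, min(10, prosentit//10)).
import Mathlib
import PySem

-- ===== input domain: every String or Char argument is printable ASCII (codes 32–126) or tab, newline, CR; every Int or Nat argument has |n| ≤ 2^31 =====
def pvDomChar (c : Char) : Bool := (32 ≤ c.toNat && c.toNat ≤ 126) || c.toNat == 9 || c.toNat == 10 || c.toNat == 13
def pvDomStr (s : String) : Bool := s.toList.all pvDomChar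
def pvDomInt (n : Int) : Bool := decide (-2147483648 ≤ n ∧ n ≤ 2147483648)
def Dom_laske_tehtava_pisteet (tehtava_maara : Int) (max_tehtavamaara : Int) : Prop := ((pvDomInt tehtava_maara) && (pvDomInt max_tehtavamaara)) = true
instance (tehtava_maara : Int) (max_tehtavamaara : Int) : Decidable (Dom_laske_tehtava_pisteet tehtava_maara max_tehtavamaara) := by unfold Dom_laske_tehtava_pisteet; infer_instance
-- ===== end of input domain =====

-- B replaces A's threshold-counting loop and special case with the clamped closed form max(0, min(10, prosentit//10)) (simpler).


-- ===== PORT A =====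
-- the 'for i in range(100,0,-10)' loop of A, as structural recursion over the range list
def pvLoop (p : Int) : List Int → Int → Int
  | [], pisteet => pisteet
  | i :: rest, pisteet => pvLoop p rest (if p < i then pisteet - 1 else pisteet)

def laske_tehtava_pisteet (tehtava_maara : Int) (max_tehtavamaara : Int) : Int :=
  let prosentit := PySem.Int.floordiv (tehtava_maara * 100) max_tehtavamaara
  if prosentit = 100 then 10
  else pvLoop prosentit (PySem.List.pyRange 100 0 (-10)) 10

-- ===== PORT B =====
-- B: closed form max(0, min(10, prosentit // 10)); same structurally simpler program as Source B
def laske_tehtava_pisteet_alt (tehtava_maara : Int) (max_tehtavamaara : Int) : Int :=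
  let prosentit := PySem.Int.floordiv (tehtava_maara * 100) max_tehtavamaara
  max 0 (min 10 (PySem.Int.floordiv prosentit 10))

-- ===== PRECONDITION & SPEC =====
-- Pre_ excludes max_tehtavamaara = 0, on which both Pythons raise ZeroDivisionError.
def Pre_laske_tehtava_pisteet (tehtava_maara : Int) (max_tehtavamaara : Int) : Prop := max_tehtavamaara ≠ 0
instance (tehtava_maara : Int) (max_tehtavamaara : Int) : Decidable (Pre_laske_tehtava_pisteet tehtava_maara max_tehtavamaara) := by unfold Pre_laske_tehtava_pisteet; infer_instance
def pvWitness_laske_tehtava_pisteet : Int × Int := (7, 19)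
def Spec_laske_tehtava_pisteet (tehtava_maara : Int) (max_tehtavamaara : Int) (out : Int) : Prop := out = laske_tehtava_pisteet_alt tehtava_maara max_tehtavamaara
instance (tehtava_maara : Int) (max_tehtavamaara : Int) (out : Int) : Decidable (Spec_laske_tehtava_pisteet tehtava_maara max_tehtavamaara out) := by unfold Spec_laske_tehtava_pisteet; infer_instance

-- ===== CLAIM (what is proved, stated in full; the proofs are below) =====
def Claim_equal_laske_tehtava_pisteet : Prop := ∀ (tehtava_maara : Int) (max_tehtavamaara : Int), Dom_laske_tehtava_pisteet tehtava_maara max_tehtavamaara → Pre_laske_tehtava_pisteet tehtava_maara max_tehtavamaara → Spec_laske_tehtava_pisteet tehtava_maara max_tehtavamaara (laske_tehtava_pisteet tehtava_maara max_tehtavamaara)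

-- ===== LEMMAS AND PROOFS =====
theorem pv_range_eval : PySem.List.pyRange 100 0 (-10) = [100,90,80,70,60,50,40,30,20,10] := by
  norm_num [PySem.List.pyRange, List.range_succ]
  rfl

theorem pvLoop_count (p : Int) (l : List Int) (n : Int) :
    pvLoop p l n = n - (l.countP (fun i => decide (p < i)) : Int) := by
  induction l generalizing n with
  | nil => simp [pvLoop]
  | cons i rest ih =>
    simp only [pvLoop, List.countP_cons, ih]
    by_cases h : p < i <;> simp [h] <;> omega

set_option maxHeartbeats 1000000 in
theorem pv_key (p : Int) :
    (if p = 100 then (10:Int) else pvLoop p (PySem.List.pyRange 100 0 (-10)) 10)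
    = max 0 (min 10 (PySem.Int.floordiv p 10)) := by
  rw [pv_range_eval, PySem.Int.floordiv_eq_ediv_of_pos (by omega), pvLoop_count]
  simp only [List.countP_cons, List.countP_nil, decide_eq_true_eq]
  split_ifs <;> omega

-- ===== VERDICT (by name: the statement is the Claim_ definition above) =====
theorem laske_tehtava_pisteet_spec : Claim_equal_laske_tehtava_pisteet := by
  intro tm mtm _ _
  unfold Spec_laske_tehtava_pisteet laske_tehtava_pisteet laske_tehtava_pisteet_alt
  exact pv_key _
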